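-- pv_equiv track=rewrite | github.com/kodoshin/a_core | a_projects/tech_doc_utils/cs_doc_utils.py | get_csharp_docstring
-- ===== SOURCE A (Python) =====
-- def get_csharp_docstring(lines, def_line_index):
--     """
--     Extrait les commentaires XML (///) contigus situés juste au-dessus de la ligne de définition.
--     :param lines: Liste des lignes du fichier.
--     :param def_line_index: Index (0-based) de la ligne de définition.
--     :return: Chaîne de caractères formée des commentaires extraits.
--     """
--     doc_lines = []
--     i = def_line_index - 1
--     while i >= 0:
--         line = lines[i].strip()
--         if line.startswith("///"):
--             # On retire le préfixe '///'
--             doc_lines.insert(0, line[3:].strip())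
--             i -= 1
--         else:
--             break
--     return "\n".join(doc_lines)
-- ===== SOURCE B (Python) =====
-- def get_csharp_docstring(lines, def_line_index):
--     # Single left-to-right fold over the prefix before the def line: the accumulator
--     # resets at every non-comment line, so it ends holding exactly the trailing
--     # contiguous '///' block (negative index means there is no prefix).
--     acc = []
--     for line in lines[:max(def_line_index, 0)]:
--         s = line.strip()
--         if s.startswith("///"):
--             acc.append(s[3:].strip())
--         else:
--             acc = []
--     return "\n".join(acc)
-- ===== Notes on version B (the rewrite author's own statement) =====
-- stated objective: alternative
-- what changed: Replaces A's backward scan with insert-at-front (no boundary known in advance) by a single left-to-right fold over the whole prefix whose accumulator resets at each non-comment line, ending with the trailing contiguous /// block.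
import Mathlib
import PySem

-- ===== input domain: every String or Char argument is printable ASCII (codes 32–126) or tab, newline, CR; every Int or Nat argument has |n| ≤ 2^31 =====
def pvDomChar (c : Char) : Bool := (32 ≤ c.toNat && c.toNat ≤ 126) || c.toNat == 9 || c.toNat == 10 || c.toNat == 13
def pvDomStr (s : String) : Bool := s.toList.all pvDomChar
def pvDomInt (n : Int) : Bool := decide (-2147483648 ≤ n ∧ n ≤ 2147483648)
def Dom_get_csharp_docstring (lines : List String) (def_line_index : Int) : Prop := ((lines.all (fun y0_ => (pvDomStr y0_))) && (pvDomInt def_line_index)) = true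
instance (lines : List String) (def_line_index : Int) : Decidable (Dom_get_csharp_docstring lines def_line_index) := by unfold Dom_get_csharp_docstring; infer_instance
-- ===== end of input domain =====

-- B replaces A's backward insert-at-front scan by a single left-to-right fold over the prefix
-- whose accumulator resets at each non-comment line (alternative decomposition, not faster).


-- ===== PORT A =====
-- A's while loop: walk upward from def_line_index-1, prepending the stripped comment text.
-- (On an out-of-range index Python raises IndexError — pyGet? = none; that branch is excluded by Pre_.)
def pvALoop (lines : List String) (i : Int) (doc : List String) : List String :=
  if _h : 0 ≤ i then
    match PySem.List.pyGet? lines i with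
    | none => doc
    | some l =>
      let line := PySem.Str.strip l
      if PySem.Str.startswith line "///" then
        pvALoop lines (i - 1) (PySem.Str.strip (PySem.Str.slice line (some 3) none) :: doc)
      else doc
  else doc
termination_by (i + 1).toNat
decreasing_by omega

def get_csharp_docstring (lines : List String) (def_line_index : Int) : String :=
  PySem.Str.join "\n" (pvALoop lines (def_line_index - 1) [])

-- ===== PORT B =====
-- One forward fold over lines[:max(def_line_index,0)]; the accumulator resets at every
-- non-comment line, so it ends holding the trailing contiguous '///' block.
def get_csharp_docstring_alt (lines : List String) (def_line_index : Int) : String :=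
  let seg := PySem.List.slice lines none (some (max def_line_index 0))
  let acc := seg.foldl (fun acc line =>
    let s := PySem.Str.strip line
    if PySem.Str.startswith s "///" then acc ++ [PySem.Str.strip (PySem.Str.slice s (some 3) none)]
    else []) []
  PySem.Str.join "\n" acc

-- ===== PRECONDITION & SPEC =====
-- A raises IndexError when def_line_index - 1 is an index past the end of lines.
def Pre_get_csharp_docstring (lines : List String) (def_line_index : Int) : Prop :=
  def_line_index ≤ (lines.length : Int)
instance (lines : List String) (def_line_index : Int) : Decidable (Pre_get_csharp_docstring lines def_line_index) := by unfold Pre_get_csharp_docstring; infer_instance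
def pvWitness_get_csharp_docstring : List String × Int := (["/// hi", "def f()"], 1)

def Spec_get_csharp_docstring (lines : List String) (def_line_index : Int) (out : String) : Prop := out = get_csharp_docstring_alt lines def_line_index
instance (lines : List String) (def_line_index : Int) (out : String) : Decidable (Spec_get_csharp_docstring lines def_line_index out) := by unfold Spec_get_csharp_docstring; infer_instance

-- ===== CLAIM (what is proved, stated in full; the proofs are below) =====
def Claim_equal_get_csharp_docstring : Prop := ∀ (lines : List String) (def_line_index : Int), Dom_get_csharp_docstring lines def_line_index → Pre_get_csharp_docstring lines def_line_index → Spec_get_csharp_docstring lines def_line_index (get_csharp_docstring lines def_line_index)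

-- ===== LEMMAS AND PROOFS =====

-- Proof-side abbreviations for the shared per-line test and transform.
def pvP (l : String) : Bool := PySem.Str.startswith (PySem.Str.strip l) "///"
def pvF (l : String) : String := PySem.Str.strip (PySem.Str.slice (PySem.Str.strip l) (some 3) none)

-- B's fold step.
def pvStep (acc : List String) (line : String) : List String :=
  if pvP line then acc ++ [pvF line] else []

-- Reference: the comment block above index n, in document order.
def pvCollect (lines : List String) : Nat → List String
  | 0 => []
  | n + 1 => if pvP (lines.getD n "") then pvCollect lines n ++ [pvF (lines.getD n "")] else []

lemma pvALoop_eq (lines : List String) (n : Nat) (hn : n ≤ lines.length) (acc : List String) :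
    pvALoop lines ((n : Int) - 1) acc = pvCollect lines n ++ acc := by
  induction n generalizing acc with
  | zero => unfold pvALoop pvCollect; simp
  | succ n ih =>
    unfold pvALoop
    have h0 : (0 : Int) ≤ (n + 1 : Nat) - 1 := by push_cast; omega
    have hget : PySem.List.pyGet? lines ((n + 1 : Nat) - 1 : Int) = some (lines.getD n "") := by
      have : ((n + 1 : Nat) : Int) - 1 = (n : Int) := by push_cast; ring
      rw [this, PySem.List.pyGet?_natCast]
      simp [List.getD, List.getElem?_eq_getElem (show n < lines.length by omega)]
    rw [dif_pos h0, hget]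
    simp only
    unfold pvCollect
    by_cases hp : pvP (lines.getD n "")
    · rw [if_pos (by simpa [pvP] using hp), if_pos hp]
      have : ((n + 1 : Nat) : Int) - 1 - 1 = (n : Int) - 1 := by push_cast; ring
      rw [this, ih (by omega)]
      simp [pvF]
    · rw [if_neg (by simpa [pvP] using hp), if_neg hp]
      simp

-- B's fold over the first n lines computes the same block.
lemma pvFold_eq (lines : List String) (n : Nat) (hn : n ≤ lines.length) :
    (lines.take n).foldl pvStep [] = pvCollect lines n := by
  induction n with
  | zero => simp [pvCollect]
  | succ n ih =>
    have htake : lines.take (n + 1) = lines.take n ++ [lines.getD n ""] := by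
      rw [List.take_add_one]
      simp [List.getD, List.getElem?_eq_getElem (show n < lines.length by omega)]
    rw [htake, List.foldl_append, ih (by omega), pvCollect]
    simp [pvStep, List.getD]

theorem pv_main (lines : List String) (d : Int) (hpre : d ≤ (lines.length : Int)) :
    get_csharp_docstring lines d = get_csharp_docstring_alt lines d := by
  unfold get_csharp_docstring get_csharp_docstring_alt
  dsimp only
  have hstep : (fun (acc : List String) (line : String) =>
      if PySem.Str.startswith (PySem.Str.strip line) "///" then
        acc ++ [PySem.Str.strip (PySem.Str.slice (PySem.Str.strip line) (some 3) none)]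
      else []) = pvStep := by
    funext acc line; simp [pvStep, pvP, pvF]
  have hm : 0 ≤ max d 0 := le_max_right d 0
  have hslice : PySem.List.slice lines none (some (max d 0)) = lines.take (max d 0).toNat :=
    PySem.List.slice_to lines hm
  set n := (max d 0).toNat with hn
  have hnl : n ≤ lines.length := by omega
  rw [hslice, hstep, pvFold_eq lines n hnl]
  by_cases hd : 0 ≤ d
  · have hdn : d = (n : Int) := by omega
    rw [hdn, pvALoop_eq lines n hnl []]
    simp
  · have hn0 : n = 0 := by omega
    have hA : pvALoop lines (d - 1) [] = [] := by
      unfold pvALoop; rw [dif_neg (by omega)]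
    rw [hA, hn0]
    rfl

-- ===== VERDICT (by name: the statement is the Claim_ definition above) =====
theorem get_csharp_docstring_spec : Claim_equal_get_csharp_docstring := by
  intro lines d _ hpre
  unfold Spec_get_csharp_docstring
  exact pv_main lines d hpre
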